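-- pv_equiv track=rewrite | github.com/farhad-ibrahimzade/EECE2140 | steps.py | display_ways
-- ===== SOURCE A (Python) =====
-- def display_ways(n):
--     if n == 1:
--         return [[1]]
--
--     if n == 2:
--         return [[1,1], [2]]
--
--     # lst = []
--     # lst1 = display_ways(n - 1)
--
--     # for way in lst1:
--     #     lst.append(way + [1])
--
--     # lst2 = display_ways(n - 2)
--
--     # for way in lst2:
--     #     lst.append(way + [2])
--
--     lst = [way + [1] for way in display_ways(n - 1)]
--     lst += [way + [2] for way in display_ways(n - 2)]
--
--     return lst
-- ===== SOURCE B (Python) =====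
-- def display_ways(n):
--     # Bottom-up iteration: keep only (ways(k-1), ways(k)) and roll the pair
--     # forward, instead of re-deriving overlapping recursive calls.
--     prev, cur = [[1]], [[1, 1], [2]]
--     if n == 1:
--         return prev
--     for _ in range(n - 2):
--         prev, cur = cur, [w + [1] for w in cur] + [w + [2] for w in prev]
--     return cur
-- ===== Notes on version B (the rewrite author's own statement) =====
-- stated objective: faster
-- what changed: Replaces the naive double recursion (which recomputes display_ways(k) exponentially many times) by a bottom-up loop that rolls a pair (ways(k-1), ways(k)) forward, building each level exactly once.
import Mathlib
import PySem

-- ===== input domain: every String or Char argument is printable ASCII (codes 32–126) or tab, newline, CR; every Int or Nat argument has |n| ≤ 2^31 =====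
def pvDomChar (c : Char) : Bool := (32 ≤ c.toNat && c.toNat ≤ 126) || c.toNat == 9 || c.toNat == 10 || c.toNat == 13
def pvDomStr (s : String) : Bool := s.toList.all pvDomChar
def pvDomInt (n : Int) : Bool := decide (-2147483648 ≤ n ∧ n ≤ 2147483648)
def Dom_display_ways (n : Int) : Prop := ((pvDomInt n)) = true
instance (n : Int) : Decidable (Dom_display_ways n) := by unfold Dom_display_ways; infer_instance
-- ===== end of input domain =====

-- B replaces A's exponential double recursion by a bottom-up loop rolling the pair
-- (ways(k-1), ways(k)) forward; objective: faster (each level built once).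

-- ===== PORT A =====
-- A recurses on n-1 and n-2; for n ≤ 0 the Python never terminates (RecursionError),
-- so the port carries a fuel counter (n.toNat is always enough fuel for n ≥ 1, i.e. on Pre_).
def displayWaysGo : Nat → Int → List (List Int)
  | fuel, n =>
    if n == 1 then [[1]]
    else if n == 2 then [[1, 1], [2]]
    else
      match fuel with
      | 0 => []
      | f + 1 =>
          ((displayWaysGo f (n - 1)).map (· ++ [1])) ++
          ((displayWaysGo f (n - 2)).map (· ++ [2]))

def display_ways (n : Int) : List (List Int) := displayWaysGo n.toNat n

-- ===== PORT B =====
-- the loop body of Source B: prev, cur = cur, [w+[1] for w in cur] + [w+[2] for w in prev]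
def pvStep (pc : List (List Int) × List (List Int)) (_ : Int) :
    List (List Int) × List (List Int) :=
  (pc.2, (pc.2.map (· ++ [1])) ++ (pc.1.map (· ++ [2])))

def display_ways_alt (n : Int) : List (List Int) :=
  let prev : List (List Int) := [[1]]
  let cur : List (List Int) := [[1, 1], [2]]
  if n == 1 then prev
  else ((PySem.List.pyRange 0 (n - 2) 1).foldl pvStep (prev, cur)).2

-- ===== PRECONDITION & SPEC =====
-- Pre_ excludes n ≤ 0, where Python A never returns (RecursionError).
def Pre_display_ways (n : Int) : Prop := 1 ≤ n
instance (n : Int) : Decidable (Pre_display_ways n) := by unfold Pre_display_ways; infer_instance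
def pvWitness_display_ways : Int := 5

def Spec_display_ways (n : Int) (out : List (List Int)) : Prop := out = display_ways_alt n
instance (n : Int) (out : List (List Int)) : Decidable (Spec_display_ways n out) := by unfold Spec_display_ways; infer_instance

-- ===== CLAIM (what is proved, stated in full; the proofs are below) =====
def Claim_equal_display_ways : Prop := ∀ (n : Int), Dom_display_ways n → Pre_display_ways n → Spec_display_ways n (display_ways n)

-- ===== LEMMAS AND PROOFS =====

-- The mathematical value: ways for a Nat argument.
def pvW : Nat → List (List Int)
  | 0 => []
  | 1 => [[1]]
  | 2 => [[1, 1], [2]]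
  | (k + 3) => ((pvW (k + 2)).map (· ++ [1])) ++ ((pvW (k + 1)).map (· ++ [2]))

theorem displayWaysGo_eq (fuel : Nat) :
    ∀ m : Nat, 1 ≤ m → m ≤ fuel + 2 → displayWaysGo fuel (m : Int) = pvW m := by
  induction fuel with
  | zero =>
      intro m h1 h2
      interval_cases m <;> simp [displayWaysGo, pvW]
  | succ f ih =>
      intro m h1 h2
      match m, h1 with
      | 1, _ => simp [displayWaysGo, pvW]
      | 2, _ => simp [displayWaysGo, pvW]
      | (k + 3), _ =>
          have e1 : ((k + 3 : Nat) : Int) - 1 = ((k + 2 : Nat) : Int) := by push_cast; ring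
          have e2 : ((k + 3 : Nat) : Int) - 2 = ((k + 1 : Nat) : Int) := by push_cast; ring
          have hne1 : ¬ (((k + 3 : Nat) : Int) == 1) = true := by simp; omega
          have hne2 : ¬ (((k + 3 : Nat) : Int) == 2) = true := by simp; omega
          rw [displayWaysGo, if_neg hne1, if_neg hne2]
          rw [e1, e2, ih (k + 2) (by omega) (by omega), ih (k + 1) (by omega) (by omega)]
          rfl

theorem foldl_pvStep (l : List Int) :
    ∀ k : Nat, l.foldl pvStep (pvW (k + 1), pvW (k + 2)) =
      (pvW (l.length + k + 1), pvW (l.length + k + 2)) := by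
  induction l with
  | nil => intro k; simp
  | cons x xs ih =>
      intro k
      have hs : pvStep (pvW (k + 1), pvW (k + 2)) x = (pvW (k + 2), pvW (k + 3)) := by
        simp [pvStep, pvW]
      rw [List.foldl_cons, hs]
      have := ih (k + 1)
      simpa [Nat.add_assoc, Nat.add_comm, Nat.add_left_comm] using this

-- ===== VERDICT (by name: the statement is the Claim_ definition above) =====
theorem display_ways_spec : Claim_equal_display_ways := by
  intro n _ hpre
  unfold Spec_display_ways
  have hn : (0:Int) ≤ n := by exact le_trans (by norm_num) hpre
  obtain ⟨m, rfl⟩ : ∃ m : Nat, n = (m : Int) := ⟨n.toNat, (Int.toNat_of_nonneg hn).symm⟩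
  have hm1 : 1 ≤ m := by unfold Pre_display_ways at hpre; exact_mod_cast hpre
  have hA : display_ways (m : Int) = pvW m := by
    unfold display_ways
    rw [Int.toNat_natCast]
    exact displayWaysGo_eq m m hm1 (by omega)
  rw [hA]
  unfold display_ways_alt
  by_cases h1 : m = 1
  · subst h1; simp [pvW]
  · have hne : ¬ (((m : Nat) : Int) == 1) = true := by simp; omega
    rw [if_neg hne]
    have hlen : (PySem.List.pyRange 0 ((m : Int) - 2) 1).length = m - 2 := by
      rw [PySem.List.length_pyRange_one]
      omega
    have := foldl_pvStep (PySem.List.pyRange 0 ((m : Int) - 2) 1) 0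
    have h2 : 2 ≤ m := by omega
    rw [hlen] at this
    have e1 : pvW 1 = [[1]] := rfl
    have e2 : pvW 2 = [[1, 1], [2]] := rfl
    rw [e1, e2] at this
    rw [this]
    have : m - 2 + 0 + 2 = m := by omega
    rw [this]
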